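-- pv_equiv track=rewrite | github.com/CameronCox123/coding-projects | HW6.py | even_cols
-- ===== SOURCE A (Python) =====
-- def even_cols(matrix):
--     """
--     Takes a matrix and loops through it, appending the position of each column with an even number of 1s.
--
--     :matrix: List. The matrix we will loop through.
--
--     :even_col_list: List. Holds the positions of columns in the inputed matrix that have an even number of 1s
--     """
--
--     one_counter = 0
--     even_col_list = []
--
--     # loops through our matrix by column. Sums the number of 1s in a column.
--     for k in range(len(matrix[0])):
--         for j in range(len(matrix)):
--
--             if matrix[j][k] == 1:
--                 one_counter += 1
--
--         # if there is an even number of 1s in the column we append the index of the column to our returned list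
--         if one_counter % 2 == 0:
--             even_col_list.append(k)
--
--         one_counter = 0
--
--     return(even_col_list)
-- ===== SOURCE B (Python) =====
-- def even_cols(matrix):
--     w = len(matrix[0])
--     counts = [0] * w
--     for row in matrix:
--         counts = [counts[k] + (row[k] == 1) for k in range(w)]
--     return [k for k in range(w) if counts[k] % 2 == 0]
-- ===== Notes on version B (the rewrite author's own statement) =====
-- stated objective: alternative
-- what changed: Replaces A's column-major nested scan (re-counting ones per column with an inner pass over all rows) by a row-major single accumulation pass maintaining a per-column counts vector, followed by a separate selection pass over the counts.
import Mathlib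
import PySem

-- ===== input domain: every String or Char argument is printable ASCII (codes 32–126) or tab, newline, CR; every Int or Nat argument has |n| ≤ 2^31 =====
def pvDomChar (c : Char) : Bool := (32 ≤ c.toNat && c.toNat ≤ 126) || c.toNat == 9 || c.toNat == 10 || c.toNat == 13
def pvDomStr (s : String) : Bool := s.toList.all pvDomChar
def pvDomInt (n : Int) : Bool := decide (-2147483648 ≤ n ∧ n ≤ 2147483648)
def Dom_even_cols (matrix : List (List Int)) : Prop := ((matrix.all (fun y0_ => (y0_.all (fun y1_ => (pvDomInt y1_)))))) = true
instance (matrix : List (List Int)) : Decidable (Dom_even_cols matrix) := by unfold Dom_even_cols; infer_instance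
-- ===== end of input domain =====

-- B replaces A's column-major nested re-count by one row-major accumulation pass over a
-- per-column counts vector plus a separate selection pass (alternative decomposition, same cost).

-- ===== PORT A =====
-- column-major: for each column k, an inner pass over all rows counts the ones, then append k if even
def even_cols (matrix : List (List Int)) : List Int :=
  (List.range (matrix.headD []).length).foldl (fun acc k =>
    let cnt : Int := (List.range matrix.length).foldl (fun c j =>
      if (matrix.getD j []).getD k 0 == 1 then c + 1 else c) 0
    if cnt % 2 == 0 then acc ++ [(k : Int)] else acc) []

-- ===== PORT B =====
-- row-major: one accumulation pass building the counts vector, then a selection pass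
def even_cols_alt (matrix : List (List Int)) : List Int :=
  let w := (matrix.headD []).length
  let counts := matrix.foldl (fun c row =>
      (List.range w).map (fun k => c.getD k 0 + if row.getD k 0 == 1 then (1 : Int) else 0))
    (List.replicate w (0 : Int))
  ((List.range w).filter (fun k => counts.getD k 0 % 2 == 0)).map (fun (k : ℕ) => (k : Int))

-- ===== PRECONDITION & SPEC =====
-- Pre_ excludes exactly the inputs on which Python A raises IndexError: the empty matrix
-- (matrix[0]) and ragged matrices with a row shorter than row 0 (matrix[j][k]).
def Pre_even_cols (matrix : List (List Int)) : Prop :=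
  matrix ≠ [] ∧ ∀ row ∈ matrix, (matrix.headD []).length ≤ row.length
instance (matrix : List (List Int)) : Decidable (Pre_even_cols matrix) := by
  unfold Pre_even_cols; infer_instance
def pvWitness_even_cols : List (List Int) := [[1, 0], [1, 0]]
def Spec_even_cols (matrix : List (List Int)) (out : List Int) : Prop := out = even_cols_alt matrix
instance (matrix : List (List Int)) (out : List Int) : Decidable (Spec_even_cols matrix out) := by unfold Spec_even_cols; infer_instance

-- ===== CLAIM (what is proved, stated in full; the proofs are below) =====
def Claim_equal_even_cols : Prop := ∀ (matrix : List (List Int)), Dom_even_cols matrix → Pre_even_cols matrix → Spec_even_cols matrix (even_cols matrix)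

-- ===== LEMMAS AND PROOFS =====

-- indexing a map over range
theorem getD_map_range' {α : Type} (f : ℕ → α) (n k : ℕ) (d : α) (hk : k < n) :
    ((List.range n).map f).getD k d = f k := by
  rw [List.getD_eq_getElem?_getD]
  simp [hk]

-- A's inner loop over row indices equals a fold over the rows themselves
theorem foldl_range_getD {α β : Type} (l : List α) (g : β → α → β) (d : α) (c : β) :
    (List.range l.length).foldl (fun c j => g c (l.getD j d)) c = l.foldl g c := by
  have h : (List.range l.length).map (fun j => l.getD j d) = l := by
    apply List.ext_getElem
    · simp
    · intro i h1 h2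
      simp [List.getD_eq_getElem?_getD, List.getElem?_eq_getElem h2]
  calc (List.range l.length).foldl (fun c j => g c (l.getD j d)) c
      = ((List.range l.length).map (fun j => l.getD j d)).foldl g c := by
        rw [List.foldl_map]
    _ = l.foldl g c := by rw [h]

-- counting fold
theorem foldl_count {α : Type} (l : List α) (p : α → Bool) (c : Int) :
    l.foldl (fun c x => if p x then c + 1 else c) c = c + (l.countP p : Int) := by
  induction l generalizing c with
  | nil => simp
  | cons x xs ih =>
      simp only [List.foldl_cons, List.countP_cons, ih]
      by_cases h : p x = true <;> simp [h] <;> ring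

-- B's accumulated counts vector, entrywise
theorem counts_getD (rows : List (List Int)) (w : ℕ) (c : List Int) (k : ℕ) (hk : k < w) :
    (rows.foldl (fun c row =>
        (List.range w).map (fun k => c.getD k 0 + if row.getD k 0 == 1 then (1 : Int) else 0)) c).getD k 0
      = c.getD k 0 + (rows.countP (fun row => row.getD k 0 == 1) : Int) := by
  induction rows generalizing c with
  | nil => simp
  | cons row rs ih =>
      simp only [List.foldl_cons, List.countP_cons, ih]
      rw [getD_map_range' _ _ _ _ hk]
      by_cases h : row.getD k 0 == 1 <;> simp [h] <;> push_cast <;> ring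

-- ===== VERDICT (by name: the statement is the Claim_ definition above) =====
theorem even_cols_spec : Claim_equal_even_cols := by
  intro matrix _ _
  unfold Spec_even_cols even_cols even_cols_alt
  rw [PySem.List.foldl_append_if]
  simp only [List.nil_append]
  refine congrArg (List.map _) (List.filter_congr ?_)
  intro k hk
  rw [List.mem_range] at hk
  have h1 := foldl_range_getD matrix
    (fun (c : Int) row => if row.getD k 0 == 1 then c + 1 else c) [] 0
  beta_reduce at h1
  rw [h1, foldl_count, counts_getD matrix _ _ k hk]
  simp
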